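-- pv_equiv track=rewrite | github.com/kaczorestore-design/advanced-dicom-ai-integrationV3 | pacs-backend/app/audit.py | anonymize_phi
-- ===== SOURCE A (Python) =====
-- from typing import Optional, Dict, Any
--
-- def anonymize_phi(data: Dict[str, Any]) -> Dict[str, Any]:
--     """Anonymize PHI data for compliance"""
--     phi_fields = [
--         'patient_name', 'first_name', 'last_name',
--         'email', 'phone', 'address', 'patient_id'
--     ]
--
--     anonymized = data.copy()
--     for field in phi_fields:
--         if field in anonymized:
--             anonymized[field] = "***REDACTED***"
--
--     return anonymized
-- ===== SOURCE B (Python) =====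
-- def _is_phi(key):
--     return (key == 'patient_name' or key == 'first_name' or key == 'last_name'
--             or key == 'email' or key == 'phone' or key == 'address'
--             or key == 'patient_id')
--
--
-- def anonymize_phi(data):
--     """Anonymize PHI data for compliance"""
--     out = []
--     for key, value in data.items():
--         out.append((key, "***REDACTED***" if _is_phi(key) else value))
--     return dict(out)
-- ===== Notes on version B (the rewrite author's own statement) =====
-- stated objective: alternative
-- what changed: B rebuilds the dict in a single accumulating pass over data.items(), deciding PHI membership with a chain of key comparisons, instead of A's loop over a fixed field list overwriting a dict copy via membership tests.
import Mathlib
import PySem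

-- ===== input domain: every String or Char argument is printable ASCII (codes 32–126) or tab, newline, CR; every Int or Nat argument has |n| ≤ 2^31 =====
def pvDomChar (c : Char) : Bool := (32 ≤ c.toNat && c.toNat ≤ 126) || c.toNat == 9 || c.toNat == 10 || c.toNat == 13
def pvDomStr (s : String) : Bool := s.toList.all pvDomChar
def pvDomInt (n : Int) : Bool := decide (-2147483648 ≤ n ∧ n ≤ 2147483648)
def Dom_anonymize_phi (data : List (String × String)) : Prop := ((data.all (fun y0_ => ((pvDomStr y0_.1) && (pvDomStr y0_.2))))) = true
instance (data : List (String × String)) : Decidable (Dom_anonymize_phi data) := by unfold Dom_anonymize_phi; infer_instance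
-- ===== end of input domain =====

-- B rebuilds the dict in one accumulating pass over the items, deciding PHI membership by a
-- chain of key comparisons, instead of A's loop over a fixed field list overwriting a copy.

-- ===== PORT A =====
def phi_fields_A : List String :=
  ["patient_name", "first_name", "last_name", "email", "phone", "address", "patient_id"]

def anonymize_phi (data : List (String × String)) : List (String × String) :=
  -- anonymized = data.copy(); for field in phi_fields: if field in anonymized: overwrite
  (phi_fields_A.foldl
    (fun (anonymized : PySem.Dict String String) field =>
      if anonymized.contains field then anonymized.insert field "***REDACTED***" else anonymized)
    (PySem.Dict.mk data)).items

-- ===== PORT B =====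
def pvIsPhi (key : String) : Bool :=
  key == "patient_name" || key == "first_name" || key == "last_name" ||
  key == "email" || key == "phone" || key == "address" || key == "patient_id"

def anonymize_phi_alt (data : List (String × String)) : List (String × String) :=
  -- out = []; for key, value in data.items(): out.append((key, redacted-or-kept)); dict(out)
  data.foldl
    (fun out kv =>
      out ++ [(kv.1, if pvIsPhi kv.1 then "***REDACTED***" else kv.2)])
    []

-- ===== PRECONDITION & SPEC =====
def Spec_anonymize_phi (data : List (String × String)) (out : List (String × String)) : Prop := out = anonymize_phi_alt data
instance (data : List (String × String)) (out : List (String × String)) : Decidable (Spec_anonymize_phi data out) := by unfold Spec_anonymize_phi; infer_instance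

-- ===== CLAIM (what is proved, stated in full; the proofs are below) =====
def Claim_equal_anonymize_phi : Prop := ∀ (data : List (String × String)), Dom_anonymize_phi data → Spec_anonymize_phi data (anonymize_phi data)

-- ===== LEMMAS AND PROOFS =====

-- One step of A's loop rewrites every item whose key equals `f` (or leaves the dict unchanged).
lemma step_items (d : PySem.Dict String String) (f : String) :
    (if d.contains f then d.insert f "***REDACTED***" else d).items
      = d.items.map (fun p => if p.1 = f then (p.1, "***REDACTED***") else p) := by
  by_cases h : d.contains f = true
  · rw [if_pos h, PySem.Dict.items_insert, if_pos h]
    apply List.map_congr_left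
    intro p _
    by_cases hp : p.1 = f <;> simp [hp]
  · rw [if_neg (by simp [h])]
    have hnot : ∀ p ∈ d.items, p.1 ≠ f := by
      intro p hp hpf
      exact h (by
        have : p.1 ∈ d.keys := PySem.Dict.mem_keys_of_mem_items d hp
        rw [PySem.Dict.contains_iff_mem_keys]
        exact hpf ▸ this)
    conv_lhs => rw [← List.map_id d.items]
    apply List.map_congr_left
    intro p hp
    simp [hnot p hp]

-- A's whole loop, as a function of the remaining field list.
lemma loop_items (fields : List String) (d : PySem.Dict String String) :
    (fields.foldl
      (fun anonymized field =>
        if anonymized.contains field then anonymized.insert field "***REDACTED***" else anonymized)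
      d).items
      = d.items.map (fun p => if fields.contains p.1 then (p.1, "***REDACTED***") else p) := by
  induction fields generalizing d with
  | nil => simp
  | cons f fs ih =>
    simp only [List.foldl_cons, ih, step_items, List.map_map]
    apply List.map_congr_left
    intro p _
    by_cases hpf : p.1 = f
    · simp [Function.comp, hpf]
    · simp [Function.comp, hpf]

-- B's chained comparison agrees with membership in A's field list.
lemma isPhi_eq_contains (k : String) : pvIsPhi k = phi_fields_A.contains k := by
  simp only [pvIsPhi, phi_fields_A, List.contains, List.elem]
  cases k == "patient_name" <;> cases k == "first_name" <;> cases k == "last_name" <;>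
    cases k == "email" <;> cases k == "phone" <;> cases k == "address" <;>
    cases k == "patient_id" <;> rfl

-- B's accumulating loop is the same item-wise rewrite of the input list.
lemma loop_alt_eq_map (l acc : List (String × String)) :
    l.foldl (fun out kv => out ++ [(kv.1, if pvIsPhi kv.1 then "***REDACTED***" else kv.2)]) acc
      = acc ++ l.map (fun p => if phi_fields_A.contains p.1 then (p.1, "***REDACTED***") else p) := by
  induction l generalizing acc with
  | nil => simp
  | cons p rest ih =>
    obtain ⟨k, v⟩ := p
    rw [List.foldl_cons, ih, isPhi_eq_contains, List.map_cons, List.append_assoc,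
      List.singleton_append]
    by_cases h : phi_fields_A.contains k = true
    · rw [if_pos h, if_pos h]
    · rw [if_neg h, if_neg h]

-- ===== VERDICT (by name: the statement is the Claim_ definition above) =====
theorem anonymize_phi_spec : Claim_equal_anonymize_phi := by
  intro data _
  show anonymize_phi data = anonymize_phi_alt data
  unfold anonymize_phi anonymize_phi_alt
  rw [loop_items, loop_alt_eq_map, List.nil_append]
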